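-- pv_equiv track=rewrite | github.com/MatiasEmaCastillo/python_tp2 | 2da Parte construccion.py | distribuir_granos
-- ===== SOURCE A (Python) =====
-- def distribuir_granos(dimension,diccionario,posicion,cant):
-- 	"Funcion que distribuye los granos que se van rompiendo en una posicion del fractal"
--
-- 	ancho,alto=dimension
-- 	columna,fila=posicion
-- 	distribucion=cant//4
-- 	sobrante=cant%4
-- 	fila_anterior=fila-1
-- 	fila_posterior=fila+2
-- 	columna_anterior=columna-1
-- 	columna_posterior=columna+2
-- 	for fila_actual in range(fila_anterior,fila_posterior):
-- 		if (fila_actual>=0 and fila_actual<alto) and fila_actual!=fila: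
-- 			diccionario[columna,fila_actual]=diccionario.get((columna,fila_actual),0)+distribucion
-- 	for columna_actual in range(columna_anterior,columna_posterior):
-- 		if (columna_actual >= 0 and columna_actual < ancho) and columna_actual != columna:
-- 			diccionario[columna_actual,fila]=diccionario.get((columna_actual,fila),0)+distribucion
-- 	diccionario[columna,fila]=sobrante
-- 	return diccionario
-- ===== SOURCE B (Python) =====
-- def distribuir_granos(dimension, diccionario, posicion, cant):
--     "Funcion que distribuye los granos que se van rompiendo en una posicion del fractal"
--     ancho, alto = dimension
--     columna, fila = posicion
--     distribucion = cant // 4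
--
--     def es_vecino(clave):
--         x, y = clave
--         return ((x == columna and abs(y - fila) == 1 and 0 <= y < alto)
--                 or (y == fila and abs(x - columna) == 1 and 0 <= x < ancho))
--
--     nuevo = {clave: valor + distribucion if es_vecino(clave) else valor
--              for clave, valor in diccionario.items()}
--     for clave in ((columna, fila - 1), (columna, fila + 1),
--                   (columna - 1, fila), (columna + 1, fila)):
--         if es_vecino(clave) and clave not in nuevo:
--             nuevo[clave] = distribucion
--     nuevo[columna, fila] = cant % 4
--     return nuevo
-- ===== Notes on version B (the rewrite author's own statement) =====
-- stated objective: alternative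
-- what changed: B rebuilds the dictionary functionally -- a single comprehension over the existing entries guarded by an is-neighbor predicate, then appending the missing in-bounds neighbors and the center -- instead of A's two range-with-center-skip passes that mutate the dict key by key; A mutates the input dict in place, B returns a fresh dict (return values are identical).
import Mathlib
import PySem

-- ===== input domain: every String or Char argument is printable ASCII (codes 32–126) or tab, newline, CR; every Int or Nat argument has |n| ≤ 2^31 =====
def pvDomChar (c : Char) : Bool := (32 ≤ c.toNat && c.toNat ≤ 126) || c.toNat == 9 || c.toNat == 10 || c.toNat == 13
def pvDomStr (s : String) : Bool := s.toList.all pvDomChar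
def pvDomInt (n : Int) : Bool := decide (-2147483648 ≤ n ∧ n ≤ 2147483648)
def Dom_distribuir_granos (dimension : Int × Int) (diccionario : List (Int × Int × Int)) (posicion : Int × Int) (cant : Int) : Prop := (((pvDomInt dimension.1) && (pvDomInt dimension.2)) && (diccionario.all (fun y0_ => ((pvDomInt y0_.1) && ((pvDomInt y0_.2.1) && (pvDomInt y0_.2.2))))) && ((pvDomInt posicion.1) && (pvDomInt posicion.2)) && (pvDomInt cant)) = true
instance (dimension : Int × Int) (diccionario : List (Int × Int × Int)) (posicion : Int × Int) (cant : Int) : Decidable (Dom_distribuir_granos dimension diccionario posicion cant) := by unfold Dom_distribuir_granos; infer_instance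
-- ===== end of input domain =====

-- B rebuilds the dictionary functionally — one comprehension over the EXISTING entries with an
-- is-neighbor predicate, then appending the missing in-bounds neighbors — instead of A's two
-- range-with-center-skip mutation passes (objective: alternative). A mutates the dict in place and
-- returns it; B returns a fresh dict — the equivalence proved here is about the RETURN value only.

-- ===== PORT A =====
-- the Python dict[(int,int), int] as a PySem.Dict keyed by the pair, entries flattened to triples
def pvToDict (l : List (Int × Int × Int)) : PySem.Dict (Int × Int) Int :=
  PySem.Dict.ofList (l.map fun e => ((e.1, e.2.1), e.2.2))
def pvOfDict (d : PySem.Dict (Int × Int) Int) : List (Int × Int × Int) :=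
  d.items.map fun e => (e.1.1, e.1.2, e.2)

def distribuir_granos (dimension : Int × Int) (diccionario : List (Int × Int × Int)) (posicion : Int × Int) (cant : Int) : List (Int × Int × Int) :=
  let ancho := dimension.1
  let alto := dimension.2
  let columna := posicion.1
  let fila := posicion.2
  let distribucion := PySem.Int.floordiv cant 4
  let sobrante := PySem.Int.mod cant 4
  let fila_anterior := fila - 1
  let fila_posterior := fila + 2
  let columna_anterior := columna - 1
  let columna_posterior := columna + 2
  let d0 := pvToDict diccionario
  let d1 := (PySem.List.pyRange fila_anterior fila_posterior 1).foldl
    (fun d fila_actual =>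
      if (0 ≤ fila_actual ∧ fila_actual < alto) ∧ fila_actual ≠ fila then
        d.insert (columna, fila_actual) (d.getD (columna, fila_actual) 0 + distribucion)
      else d) d0
  let d2 := (PySem.List.pyRange columna_anterior columna_posterior 1).foldl
    (fun d columna_actual =>
      if (0 ≤ columna_actual ∧ columna_actual < ancho) ∧ columna_actual ≠ columna then
        d.insert (columna_actual, fila) (d.getD (columna_actual, fila) 0 + distribucion)
      else d) d1
  pvOfDict (d2.insert (columna, fila) sobrante)

-- ===== PORT B =====
-- Python helper es_vecino: in-bounds orthogonal neighbor of (columna, fila)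
def pvVecino (ancho alto columna fila : Int) (k : Int × Int) : Bool :=
  (k.1 == columna && (k.2 - fila).natAbs == 1 && (decide (0 ≤ k.2) && decide (k.2 < alto))) ||
  (k.2 == fila && (k.1 - columna).natAbs == 1 && (decide (0 ≤ k.1) && decide (k.1 < ancho)))

def distribuir_granos_alt (dimension : Int × Int) (diccionario : List (Int × Int × Int)) (posicion : Int × Int) (cant : Int) : List (Int × Int × Int) :=
  let ancho := dimension.1
  let alto := dimension.2
  let columna := posicion.1
  let fila := posicion.2
  let distribucion := PySem.Int.floordiv cant 4
  let d0 := pvToDict diccionario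
  -- dict comprehension over the existing entries
  let nuevo0 := PySem.Dict.ofList (d0.items.map
    (fun kv => (kv.1, if pvVecino ancho alto columna fila kv.1 then kv.2 + distribucion else kv.2)))
  -- append the in-bounds neighbors that were not present yet
  let nuevo := [(columna, fila - 1), (columna, fila + 1), (columna - 1, fila), (columna + 1, fila)].foldl
    (fun d k => if pvVecino ancho alto columna fila k && !d.contains k then d.insert k distribucion else d)
    nuevo0
  pvOfDict (nuevo.insert (columna, fila) (PySem.Int.mod cant 4))

-- ===== PRECONDITION & SPEC =====
def Spec_distribuir_granos (dimension : Int × Int) (diccionario : List (Int × Int × Int)) (posicion : Int × Int) (cant : Int) (out : List (Int × Int × Int)) : Prop := out = distribuir_granos_alt dimension diccionario posicion cant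
instance (dimension : Int × Int) (diccionario : List (Int × Int × Int)) (posicion : Int × Int) (cant : Int) (out : List (Int × Int × Int)) : Decidable (Spec_distribuir_granos dimension diccionario posicion cant out) := by unfold Spec_distribuir_granos; infer_instance

-- ===== CLAIM (what is proved, stated in full; the proofs are below) =====
def Claim_equal_distribuir_granos : Prop := ∀ (dimension : Int × Int) (diccionario : List (Int × Int × Int)) (posicion : Int × Int) (cant : Int), Dom_distribuir_granos dimension diccionario posicion cant → Spec_distribuir_granos dimension diccionario posicion cant (distribuir_granos dimension diccionario posicion cant)

-- ===== LEMMAS AND PROOFS =====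
theorem pvRange3 (f : Int) : PySem.List.pyRange (f - 1) (f + 2) 1 = [f - 1, f, f + 1] := by
  rw [PySem.List.pyRange_one_cons (by omega), PySem.List.pyRange_one_cons (by omega),
      PySem.List.pyRange_one_cons (by omega), PySem.List.pyRange_one_eq_nil (by omega)]
  norm_num

-- Dict.ofList of a list with distinct keys is that items list unchanged
theorem pv_ofList_eq_mk (l : List ((Int × Int) × Int)) (h : (l.map (·.1)).Nodup) :
    PySem.Dict.ofList l = PySem.Dict.mk l := by
  apply PySem.Dict.ext
  have := PySem.Dict.items_foldl_insert_fresh l (·.1) (·.2) PySem.Dict.empty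
    (fun a _ => PySem.Dict.contains_empty _) h
  simpa [PySem.Dict.ofList, PySem.Dict.update] using this

-- mapping a first-component-preserving function does not change membership of a key
theorem pv_contains_mk_map (d : PySem.Dict (Int × Int) Int) (g : ((Int × Int) × Int) → ((Int × Int) × Int))
    (hg : ∀ p, (g p).1 = p.1) (k : Int × Int) :
    (PySem.Dict.mk (d.items.map g)).contains k = d.contains k := by
  simp only [PySem.Dict.contains, List.any_map]
  congr 1
  funext p
  simp [Function.comp, hg p]

-- the update loop (A's view: conditionally add `dist` at each key of `ks`, in order) equals
-- the rebuild (B's view: bump every present key satisfying `c` at once, then append the rest)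
theorem pv_main (c : (Int × Int) → Bool) (dist : Int) :
    ∀ (ks : List (Int × Int)) (d : PySem.Dict (Int × Int) Int), ks.Nodup → d.keys.Nodup →
    ks.foldl (fun d k => if c k then d.insert k (d.getD k 0 + dist) else d) d
    = ks.foldl (fun d k => if c k && !d.contains k then d.insert k dist else d)
        (PySem.Dict.mk (d.items.map (fun p => if c p.1 && ks.contains p.1 then (p.1, p.2 + dist) else p))) := by
  intro ks
  induction ks with
  | nil =>
    intro d _ _
    simp
  | cons k ks ih =>
    intro d hks hnd
    obtain ⟨hkn, hks'⟩ := List.nodup_cons.mp hks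
    have hknc : ks.contains k = false := by simpa using hkn
    simp only [List.foldl_cons]
    cases hck : c k with
    | false =>
      rw [if_neg (by simp), if_neg (by simp)]
      rw [ih d hks' hnd]
      congr 2
      apply List.map_congr_left
      intro p _
      by_cases hcp : c p.1 = true
      · have hne : (p.1 == k) = false := by
          by_contra h
          have : p.1 = k := by simpa using (Bool.not_eq_false _).mp h
          rw [this, hck] at hcp; exact Bool.false_ne_true hcp
        have hpne : ¬ p.1 = k := by simpa using hne
        simp [hcp, hpne]
      · simp [Bool.eq_false_iff.mpr hcp]
    | true =>
      rw [if_pos (by simp)]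
      rw [ih (d.insert k (d.getD k 0 + dist)) hks' (PySem.Dict.nodup_keys_insert d k _ hnd)]
      have hcontsame := pv_contains_mk_map d
        (fun p => if c p.1 && (k :: ks).contains p.1 then (p.1, p.2 + dist) else p)
        (fun p => by
          show (if (c p.1 && (k :: ks).contains p.1) = true then (p.1, p.2 + dist) else p).1 = p.1
          split <;> rfl) k
      cases hcont : d.contains k with
      | true =>
        rw [if_neg (by simp only [hcontsame, hcont]; simp)]
        congr 1
        apply PySem.Dict.ext
        show ((d.insert k (d.getD k 0 + dist)).items.map _) = (d.items.map _)
        rw [PySem.Dict.items_insert_of_contains d _ hcont, List.map_map]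
        apply List.map_congr_left
        intro p hp
        by_cases hpk : p.1 = k
        · have hv : d.getD k 0 = p.2 := by
            apply PySem.Dict.getD_of_mem_items _ _ hnd
            rw [← hpk]; exact hp
          simp [Function.comp, hpk, hck, hv, hkn]
        · simp [Function.comp, hpk]
      | false =>
        rw [if_pos (by simp only [hcontsame, hcont]; simp)]
        congr 1
        apply PySem.Dict.ext
        show ((d.insert k (d.getD k 0 + dist)).items.map _)
          = ((PySem.Dict.mk (d.items.map _)).insert k dist).items
        rw [PySem.Dict.items_insert_of_not_contains d _ hcont,
            PySem.Dict.getD_of_not_contains d 0 hcont,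
            PySem.Dict.items_insert_of_not_contains _ dist (by rw [hcontsame]; exact hcont)]
        rw [List.map_append]
        congr 1
        · apply List.map_congr_left
          intro p hp
          have hpk : ¬ p.1 = k := by
            have h2 : ¬ (p.1 == k) = true := List.any_eq_false.mp hcont p hp
            simpa using h2
          simp [hpk]
        · simp [hck, hkn]

-- an in-bounds neighbor key is one of the four explicit neighbor keys
theorem pv_vec_mem (ancho alto columna fila : Int) (k : Int × Int)
    (h : pvVecino ancho alto columna fila k = true) :
    ([(columna, fila - 1), (columna, fila + 1), (columna - 1, fila), (columna + 1, fila)].contains k) = true := by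
  obtain ⟨x, y⟩ := k
  simp only [pvVecino] at h
  simp only [List.contains_cons, List.contains_nil, Bool.or_false]
  simp at h ⊢
  omega

-- ===== VERDICT (by name: the statement is the Claim_ definition above) =====
theorem distribuir_granos_spec : Claim_equal_distribuir_granos := by
  intro dimension diccionario posicion cant _
  obtain ⟨ancho, alto⟩ := dimension
  obtain ⟨columna, fila⟩ := posicion
  unfold Spec_distribuir_granos distribuir_granos distribuir_granos_alt
  dsimp only
  have hnd : (pvToDict diccionario).keys.Nodup := PySem.Dict.nodup_keys_ofList _
  have hks : ([(columna, fila - 1), (columna, fila + 1), (columna - 1, fila), (columna + 1, fila)] : List (Int × Int)).Nodup := by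
    simp [Prod.ext_iff]; omega
  have hMain := pv_main (pvVecino ancho alto columna fila) (PySem.Int.floordiv cant 4)
    [(columna, fila - 1), (columna, fila + 1), (columna - 1, fila), (columna + 1, fila)]
    (pvToDict diccionario) hks hnd
  have e1 : ((0 ≤ fila - 1 ∧ fila - 1 < alto) ∧ fila - 1 ≠ fila) ↔ (pvVecino ancho alto columna fila (columna, fila - 1) = true) := by
    simp [pvVecino]
  have e2 : ((0 ≤ fila + 1 ∧ fila + 1 < alto) ∧ fila + 1 ≠ fila) ↔ (pvVecino ancho alto columna fila (columna, fila + 1) = true) := by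
    simp [pvVecino]
  have e3 : ((0 ≤ columna - 1 ∧ columna - 1 < ancho) ∧ columna - 1 ≠ columna) ↔ (pvVecino ancho alto columna fila (columna - 1, fila) = true) := by
    simp [pvVecino]
  have e4 : ((0 ≤ columna + 1 ∧ columna + 1 < ancho) ∧ columna + 1 ≠ columna) ↔ (pvVecino ancho alto columna fila (columna + 1, fila) = true) := by
    simp [pvVecino]
  have hstart : PySem.Dict.ofList ((pvToDict diccionario).items.map
      (fun kv => (kv.1, if pvVecino ancho alto columna fila kv.1 then kv.2 + PySem.Int.floordiv cant 4 else kv.2)))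
      = PySem.Dict.mk ((pvToDict diccionario).items.map
      (fun p => if pvVecino ancho alto columna fila p.1 &&
          ([(columna, fila - 1), (columna, fila + 1), (columna - 1, fila), (columna + 1, fila)] : List (Int × Int)).contains p.1
        then (p.1, p.2 + PySem.Int.floordiv cant 4) else p)) := by
    rw [pv_ofList_eq_mk _ (by rw [List.map_map]; exact hnd)]
    apply PySem.Dict.ext
    show List.map _ _ = List.map _ _
    apply List.map_congr_left
    intro p _
    cases hv : pvVecino ancho alto columna fila p.1 with
    | true =>
      have hm := pv_vec_mem ancho alto columna fila p.1 hv
      simp only [List.contains_cons, List.contains_nil, Bool.or_false, Bool.or_eq_true,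
        beq_iff_eq] at hm
      simp
      intro h1 h2 h3 h4
      rcases hm with h | h | h | h
      · exact absurd h h1
      · exact absurd h h2
      · exact absurd h h3
      · exact absurd h h4
    | false => simp
  rw [pvRange3 fila, pvRange3 columna]
  simp only [List.foldl_cons, List.foldl_nil] at hMain ⊢
  rw [if_neg (show ¬((0 ≤ fila ∧ fila < alto) ∧ fila ≠ fila) by simp),
      if_neg (show ¬((0 ≤ columna ∧ columna < ancho) ∧ columna ≠ columna) by simp)]
  simp only [e1, e2, e3, e4]
  rw [hMain, hstart]
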